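-- pv_equiv track=rewrite | github.com/cvzi/mensa | mensenat/utils.py | format_times
-- ===== SOURCE A (Python) =====
-- DAY_ORDER = [
--     ("monday", "Mo"),
--     ("tuesday", "Di"),
--     ("wednesday", "Mi"),
--     ("thursday", "Do"),
--     ("friday", "Fr"),
--     ("saturday", "Sa"),
--     ("sunday", "So"),
-- ]
--
-- def compact_whitespace(text):
--     return " ".join((text or "").split())
--
-- def format_times(opening_hours):
--     if not opening_hours:
--         return ""
--
--     groups = []
--     current_labels = []
--     current_value = None
--
--     for key, label in DAY_ORDER:
--         slots = opening_hours.get(key) or []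
--         value = ", ".join(
--             compact_whitespace(slot) for slot in slots if compact_whitespace(slot)
--         )
--
--         if not value:
--             if current_labels:
--                 groups.append((current_labels, current_value))
--                 current_labels = []
--                 current_value = None
--             continue
--
--         if value == current_value:
--             current_labels.append(label)
--             continue
--
--         if current_labels:
--             groups.append((current_labels, current_value))
--         current_labels = [label]
--         current_value = value
--
--     if current_labels:
--         groups.append((current_labels, current_value))
--
--     lines = []
--     for labels, value in groups:
--         day_label = labels[0] if len(labels) == 1 else f"{labels[0]}-{labels[-1]}"
--         lines.append(f"{day_label} {value} Uhr")
--     return "\n".join(lines)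
-- ===== SOURCE B (Python) =====
-- DAY_ORDER = [
--     ("monday", "Mo"),
--     ("tuesday", "Di"),
--     ("wednesday", "Mi"),
--     ("thursday", "Do"),
--     ("friday", "Fr"),
--     ("saturday", "Sa"),
--     ("sunday", "So"),
-- ]
--
-- def compact_whitespace(text):
--     return " ".join((text or "").split())
--
-- def _emit(days):
--     if not days:
--         return []
--     (label, value), rest = days[0], days[1:]
--     if not value:
--         return _emit(rest)
--     k = 0
--     while k < len(rest) and rest[k][1] == value:
--         k += 1
--     day_label = label if k == 0 else f"{label}-{rest[k-1][0]}"
--     return [f"{day_label} {value} Uhr"] + _emit(rest[k:])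
--
-- def format_times(opening_hours):
--     if not opening_hours:
--         return ""
--
--     def day_value(key):
--         parts = [compact_whitespace(s) for s in (opening_hours.get(key) or [])]
--         return ", ".join(p for p in parts if p)
--
--     days = [(label, day_value(key)) for key, label in DAY_ORDER]
--     return "\n".join(_emit(days))
-- ===== Notes on version B (the rewrite author's own statement) =====
-- stated objective: alternative
-- what changed: Replaces A's single state-machine loop (pending labels/value accumulator flushed into a groups list, then a second formatting loop) by two distinct phases: first map each day to its (label, value) pair, then a recursive run-collapsing pass that scans each run of equal nonempty values with an index pointer and emits the formatted line directly.
import Mathlib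
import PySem

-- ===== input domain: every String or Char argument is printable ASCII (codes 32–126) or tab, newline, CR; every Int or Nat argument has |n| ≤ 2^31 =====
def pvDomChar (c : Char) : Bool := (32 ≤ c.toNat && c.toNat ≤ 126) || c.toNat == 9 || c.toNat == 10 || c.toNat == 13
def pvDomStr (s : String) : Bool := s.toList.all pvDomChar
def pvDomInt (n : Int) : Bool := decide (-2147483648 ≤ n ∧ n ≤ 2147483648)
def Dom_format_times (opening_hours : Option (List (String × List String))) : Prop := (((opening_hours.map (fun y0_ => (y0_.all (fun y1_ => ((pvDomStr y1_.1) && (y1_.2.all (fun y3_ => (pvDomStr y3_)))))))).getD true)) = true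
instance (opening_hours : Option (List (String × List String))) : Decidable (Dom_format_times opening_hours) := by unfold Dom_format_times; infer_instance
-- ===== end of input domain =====

-- B replaces A's state-machine loop by a map phase plus a recursive run-collapsing pass (alternative decomposition, same cost).

-- shared module helpers (DAY_ORDER and compact_whitespace appear in both Pythons)
def pvDAY_ORDER : List (String × String) :=
  [("monday","Mo"),("tuesday","Di"),("wednesday","Mi"),("thursday","Do"),("friday","Fr"),("saturday","Sa"),("sunday","So")]

def pvCompact (t : String) : String := PySem.Str.join " " (PySem.Str.split₀ t)

-- dict.get on the association list: first match, missing/empty → []  ('opening_hours.get(key) or []')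
def pvGet (d : List (String × List String)) (k : String) : List String :=
  ((d.find? (fun p => p.1 == k)).map Prod.snd).getD []

-- ===== PORT A =====
-- state = (groups, current_labels, current_value)
def pvStep (d : List (String × List String))
    (st : List (List String × Option String) × List String × Option String)
    (kl : String × String) : List (List String × Option String) × List String × Option String :=
  let slots := pvGet d kl.1
  let value := PySem.Str.join ", " ((slots.map pvCompact).filter (fun c => c ≠ ""))
  if value = "" then
    (if st.2.1 ≠ [] then (st.1 ++ [(st.2.1, st.2.2)], [], none) else st)
  else if some value = st.2.2 then (st.1, st.2.1 ++ [kl.2], st.2.2)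
  else if st.2.1 ≠ [] then (st.1 ++ [(st.2.1, st.2.2)], [kl.2], some value)
  else (st.1, [kl.2], some value)

def pvFmt (g : List String × Option String) : String :=
  let dayLabel := if g.1.length = 1 then PySem.List.pyGetD g.1 0 ""
                  else PySem.List.pyGetD g.1 0 "" ++ "-" ++ PySem.List.pyGetD g.1 (-1) ""
  dayLabel ++ " " ++ g.2.getD "" ++ " Uhr"

def format_times (opening_hours : Option (List (String × List String))) : String :=
  match opening_hours with
  | none => ""
  | some d =>
    if d = [] then "" else
    let st := pvDAY_ORDER.foldl (pvStep d) ([], [], none)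
    let groups := if st.2.1 ≠ [] then st.1 ++ [(st.2.1, st.2.2)] else st.1
    PySem.Str.join "\n" (groups.map pvFmt)

-- ===== PORT B =====
def pvValue (d : List (String × List String)) (key : String) : String :=
  PySem.Str.join ", " ((((pvGet d key).map pvCompact)).filter (fun p => p ≠ ""))

-- _emit: the index scan over the run of equal values is takeWhile/dropWhile; rest[k-1] is the run's last element
def pvEmit : List (String × String) → List String
  | [] => []
  | lv :: rest =>
    if lv.2 = "" then pvEmit rest
    else
      let run := rest.takeWhile (fun p => p.2 == lv.2)
      let dayLabel := match run.getLast? with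
        | none => lv.1
        | some q => lv.1 ++ "-" ++ q.1
      (dayLabel ++ " " ++ lv.2 ++ " Uhr") :: pvEmit (rest.dropWhile (fun p => p.2 == lv.2))
  termination_by ds => ds.length
  decreasing_by
    · simp only [List.length_cons]; omega
    · have := List.length_dropWhile_le (p := fun p => p.2 == lv.2) (l := rest)
      simp only [List.length_cons]; omega

def format_times_alt (opening_hours : Option (List (String × List String))) : String :=
  match opening_hours with
  | none => ""
  | some d =>
    if d = [] then "" else
    let days := pvDAY_ORDER.map (fun kl => (kl.2, pvValue d kl.1))
    PySem.Str.join "\n" (pvEmit days)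

-- ===== PRECONDITION & SPEC =====
def Spec_format_times (opening_hours : Option (List (String × List String))) (out : String) : Prop := out = format_times_alt opening_hours
instance (opening_hours : Option (List (String × List String))) (out : String) : Decidable (Spec_format_times opening_hours out) := by unfold Spec_format_times; infer_instance

-- ===== CLAIM (what is proved, stated in full; the proofs are below) =====
def Claim_equal_format_times : Prop := ∀ (opening_hours : Option (List (String × List String))), Dom_format_times opening_hours → Spec_format_times opening_hours (format_times opening_hours)

-- ===== LEMMAS AND PROOFS =====

-- A's step on the precomputed (label, value) pair
def pvStep' (st : List (List String × Option String) × List String × Option String)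
    (lv : String × String) : List (List String × Option String) × List String × Option String :=
  if lv.2 = "" then
    (if st.2.1 ≠ [] then (st.1 ++ [(st.2.1, st.2.2)], [], none) else st)
  else if some lv.2 = st.2.2 then (st.1, st.2.1 ++ [lv.1], st.2.2)
  else if st.2.1 ≠ [] then (st.1 ++ [(st.2.1, st.2.2)], [lv.1], some lv.2)
  else (st.1, [lv.1], some lv.2)

theorem pvStep_eq (d : List (String × List String)) (st) (kl : String × String) :
    pvStep d st kl = pvStep' st (kl.2, pvValue d kl.1) := by
  simp [pvStep, pvStep', pvValue]

def pvClose (r : List (List String × Option String) × List String × Option String) :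
    List (List String × Option String) :=
  if r.2.1 ≠ [] then r.1 ++ [(r.2.1, r.2.2)] else r.1

def pvFinal (st : List (List String × Option String) × List String × Option String)
    (ds : List (String × String)) : List (List String × Option String) :=
  pvClose (ds.foldl pvStep' st)

theorem pvStep'_shift (g : List (List String × Option String)) (ls : List String)
    (v : Option String) (p : String × String) :
    pvStep' (g, ls, v) p
      = (g ++ (pvStep' ([], ls, v) p).1, (pvStep' ([], ls, v) p).2.1, (pvStep' ([], ls, v) p).2.2) := by
  simp [pvStep']; split_ifs <;> simp

theorem pvFinal_prefix (ds : List (String × String)) :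
    ∀ g ls v, pvFinal (g, ls, v) ds = g ++ pvFinal ([], ls, v) ds := by
  induction ds with
  | nil => intro g ls v; simp only [pvFinal, List.foldl_nil, pvClose]; split <;> simp
  | cons p ds ih =>
    intro g ls v
    have hsplit := pvStep'_shift g ls v p
    rcases hA : pvStep' ([], ls, v) p with ⟨a, b, c⟩
    rw [hA] at hsplit
    simp only at hsplit
    simp only [pvFinal, List.foldl_cons, hsplit, hA]
    have h1 := ih (g ++ a) b c
    have h2 := ih a b c
    simp only [pvFinal] at h1 h2
    rw [h1, h2, List.append_assoc]

theorem pvFinal_pending (ds : List (String × String)) :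
    ∀ g ls v, ls ≠ [] → v ≠ "" →
    pvFinal (g, ls, some v) ds =
      g ++ (ls ++ (ds.takeWhile (fun p => p.2 == v)).map Prod.fst, some v)
        :: pvFinal ([], [], none) (ds.dropWhile (fun p => p.2 == v)) := by
  induction ds with
  | nil => intro g ls v hls hv; simp [pvFinal, pvClose, hls]
  | cons p ds ih =>
    intro g ls v hls hv
    by_cases hpv : p.2 = v
    · have htw : List.takeWhile (fun q => q.2 == v) (p :: ds)
          = p :: List.takeWhile (fun q => q.2 == v) ds := by simp [hpv]
      have hdw : List.dropWhile (fun q => q.2 == v) (p :: ds)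
          = List.dropWhile (fun q => q.2 == v) ds := by simp [hpv]
      have hstep : pvStep' (g, ls, some v) p = (g, ls ++ [p.1], some v) := by
        simp [pvStep', hpv, hv]
      simp only [pvFinal, List.foldl_cons, hstep, htw, hdw]
      have := ih g (ls ++ [p.1]) v (by simp) hv
      simp only [pvFinal] at this
      rw [this]; simp
    · have htw : List.takeWhile (fun q => q.2 == v) (p :: ds) = [] := by
        simp [hpv]
      have hdw : List.dropWhile (fun q => q.2 == v) (p :: ds) = p :: ds := by
        simp [hpv]
      by_cases hpe : p.2 = ""
      · have hstep : pvStep' (g, ls, some v) p = (g ++ [(ls, some v)], [], none) := by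
          simp [pvStep', hpe, hls]
        have hstep2 : pvStep' ([], [], none) p = ([], [], none) := by
          simp [pvStep', hpe]
        simp only [pvFinal, List.foldl_cons, hstep, htw, hdw, hstep2]
        have h1 := pvFinal_prefix ds (g ++ [(ls, some v)]) [] none
        simp only [pvFinal] at h1
        rw [h1]
        simp
      · have hstep : pvStep' (g, ls, some v) p = (g ++ [(ls, some v)], [p.1], some p.2) := by
          simp [pvStep', hpe, hls]
          exact hpv
        have hstep2 : pvStep' ([], [], none) p = ([], [p.1], some p.2) := by
          simp [pvStep', hpe]
        simp only [pvFinal, List.foldl_cons, hstep, htw, hdw, hstep2]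
        have h1 := pvFinal_prefix ds (g ++ [(ls, some v)]) [p.1] (some p.2)
        simp only [pvFinal] at h1
        rw [h1]
        simp

theorem pvMain : ∀ n (ds : List (String × String)), ds.length ≤ n →
    (pvFinal ([], [], none) ds).map pvFmt = pvEmit ds := by
  intro n
  induction n with
  | zero =>
    intro ds h
    have : ds = [] := List.length_eq_zero_iff.mp (Nat.le_zero.mp h)
    subst this; simp [pvFinal, pvClose, pvEmit]
  | succ n ih =>
    intro ds h
    match ds with
    | [] => simp [pvFinal, pvClose, pvEmit]
    | p :: rest =>
      by_cases hpe : p.2 = ""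
      · have hstep : pvStep' ([], [], none) p = ([], [], none) := by simp [pvStep', hpe]
        simp only [pvFinal, List.foldl_cons, hstep]
        have := ih rest (by simp only [List.length_cons] at h; omega)
        simp only [pvFinal] at this
        rw [this, pvEmit]
        simp [hpe]
      · have hstep : pvStep' ([], [], none) p = ([], [p.1], some p.2) := by simp [pvStep', hpe]
        simp only [pvFinal, List.foldl_cons, hstep]
        have hp := pvFinal_pending rest [] [p.1] p.2 (by simp) hpe
        simp only [pvFinal] at hp
        rw [hp]
        rw [pvEmit]
        simp only [if_neg hpe, List.map_cons, List.nil_append]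
        have hrec := ih (rest.dropWhile (fun q => q.2 == p.2)) (by
          have := List.length_dropWhile_le (p := fun q => q.2 == p.2) (l := rest)
          simp only [List.length_cons] at h; omega)
        simp only [pvFinal] at hrec
        rw [hrec]
        congr 1
        match hlast : (rest.takeWhile (fun q => q.2 == p.2)).getLast? with
        | none =>
          have hrn : rest.takeWhile (fun q => q.2 == p.2) = [] := by
            cases hh : rest.takeWhile (fun q => q.2 == p.2) <;> simp_all
          simp [pvFmt, hrn, PySem.List.pyGetD]
        | some q =>
          rcases List.getLast?_eq_some_iff.mp hlast with ⟨rs, hrs⟩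
          simp only [pvFmt, hrs, List.map_append, List.map_cons, List.map_nil,
            List.singleton_append]
          rw [if_neg (by simp)]
          rw [PySem.List.pyGetD_zero_cons]
          rw [show p.1 :: (List.map Prod.fst rs ++ [q.1]) = (p.1 :: List.map Prod.fst rs) ++ [q.1] from by simp]
          rw [PySem.List.pyGetD_neg_one_append_singleton]
          simp

-- ===== VERDICT (by name: the statement is the Claim_ definition above) =====
theorem format_times_spec : Claim_equal_format_times := by
  unfold Claim_equal_format_times
  intro oh _
  unfold Spec_format_times
  match oh with
  | none => rfl
  | some d =>
    simp only [format_times, format_times_alt]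
    by_cases hd : d = []
    · simp [hd]
    · simp only [if_neg hd]
      have hfold : pvDAY_ORDER.foldl (pvStep d) ([], [], none)
          = (pvDAY_ORDER.map (fun kl => (kl.2, pvValue d kl.1))).foldl pvStep' ([], [], none) := by
        rw [List.foldl_map]
        apply PySem.List.foldl_congr_mem
        intro st kl _
        exact pvStep_eq d st kl
      congr 1
      have := pvMain (pvDAY_ORDER.map (fun kl => (kl.2, pvValue d kl.1))).length _ (le_refl _)
      simp only [pvFinal] at this
      rw [hfold]
      exact this
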